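-- pv_equiv track=rewrite | github.com/samrachana/Samrachana-Araniko | solve.py | isfun
-- ===== SOURCE A (Python) =====
-- def isfun(index,string):
--     l = len(string)
--     p = True
--     for t in range(index+1,len(string)):
--         if string[t] == '(':
--             l = t
--             break;
--         elif not string[t].islower():
--             l=len(string)
--             break;
--     return True if (l!=len(string) and p) else False
-- ===== SOURCE B (Python) =====
-- def isfun(index, string):
--     rest = string[index+1:]
--     pos = rest.find('(')
--     if pos == -1:
--         return False
--     return all(c.islower() for c in rest[:pos])
-- ===== Notes on version B (the rewrite author's own statement) =====
-- stated objective: simpler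
-- what changed: Replaces A's single interleaved early-exit index loop with a two-phase decomposition: slice off the suffix, locate the first '(' with find, then validate that every character before it is lowercase.
-- outside the precondition, e.g. on isfun(-2, '(ab'): A returns True, B returns False
import Mathlib
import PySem

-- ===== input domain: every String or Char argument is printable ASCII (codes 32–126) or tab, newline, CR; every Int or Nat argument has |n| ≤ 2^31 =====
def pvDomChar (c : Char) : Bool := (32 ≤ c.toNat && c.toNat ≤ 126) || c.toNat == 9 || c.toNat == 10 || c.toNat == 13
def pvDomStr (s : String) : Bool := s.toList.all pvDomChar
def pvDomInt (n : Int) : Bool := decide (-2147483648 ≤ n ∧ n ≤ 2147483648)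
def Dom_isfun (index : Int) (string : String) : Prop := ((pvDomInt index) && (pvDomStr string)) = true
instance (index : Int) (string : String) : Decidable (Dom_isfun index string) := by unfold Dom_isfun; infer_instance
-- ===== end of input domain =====

-- B replaces A's single interleaved early-exit index loop by a two-phase 'find the first '(',
-- then check the prefix is all-lowercase' decomposition (objective: simpler).

-- ===== PORT A =====
-- A's for-loop over range(index+1, len(string)) with its two breaks; l is the loop state.
-- On an out-of-range index Python raises IndexError (pyGet? = none); excluded by Pre_isfun,
-- the port returns the current l there (unreached inside Pre_).
def isfunLoop (cs : List Char) (ts : List Int) (l : Int) : Int :=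
  match ts with
  | [] => l
  | t :: rest =>
    match PySem.List.pyGet? cs t with
    | none => l
    | some c =>
      if c = '(' then t
      else if ¬ (PySem.Chars.islower c = true) then (cs.length : Int)
      else isfunLoop cs rest l

def isfun (index : Int) (string : String) : Bool :=
  let cs := string.toList
  let l : Int := cs.length
  let p : Bool := true
  let l' := isfunLoop cs (PySem.List.pyRange (index + 1) cs.length 1) l
  if l' ≠ (cs.length : Int) ∧ p = true then true else false

-- ===== PORT B =====
def isfun_alt (index : Int) (string : String) : Bool :=
  let rest := PySem.List.slice string.toList (some (index + 1)) none
  let pos := PySem.Chars.find rest ['(']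
  if pos = -1 then false
  else (PySem.List.slice rest none (some pos)).all PySem.Chars.islower

-- ===== PRECONDITION & SPEC =====
-- Pre_ excludes index < -1: there A's per-index negative lookups either raise IndexError
-- (when index+1 < -len, see Raises_) or scan a wrapped-around, non-contiguous sequence of
-- positions — an accidental corner where A's and B's (slice-based) values are both defensible.
def Pre_isfun (index : Int) (string : String) : Prop := -1 ≤ index
instance (index : Int) (string : String) : Decidable (Pre_isfun index string) := by unfold Pre_isfun; infer_instance
def pvWitness_isfun : Int × String := (0, "ab(")

def Spec_isfun (index : Int) (string : String) (out : Bool) : Prop := out = isfun_alt index string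
instance (index : Int) (string : String) (out : Bool) : Decidable (Spec_isfun index string out) := by unfold Spec_isfun; infer_instance

-- ===== CLAIM =====
def Claim_equal_isfun : Prop := ∀ (index : Int) (string : String), Dom_isfun index string → Pre_isfun index string → Spec_isfun index string (isfun index string)

-- ===== LEMMAS AND PROOFS =====

-- the value both programs compute on the suffix string[index+1:]: True iff a '(' occurs and
-- every character before the first '(' is lowercase
def scanPred (cs : List Char) : Bool :=
  match cs with
  | [] => false
  | c :: rest => if c = '(' then true else if ¬ (PySem.Chars.islower c = true) then false else scanPred rest

lemma loopA (cs : List Char) (n : Nat) (i : Nat) (hn : cs.length - i ≤ n) :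
    (isfunLoop cs (PySem.List.pyRange (i : Int) cs.length 1) (cs.length : Int) ≠ (cs.length : Int))
      ↔ scanPred (cs.drop i) = true := by
  induction n generalizing i with
  | zero =>
    have hi : cs.length ≤ i := by omega
    rw [PySem.List.pyRange_one_eq_nil (by exact_mod_cast hi)]
    simp [isfunLoop, List.drop_eq_nil_of_le hi, scanPred]
  | succ n ih =>
    by_cases hi : i < cs.length
    · rw [PySem.List.pyRange_one_cons (by exact_mod_cast hi)]
      have hg : PySem.List.pyGet? cs (i : Int) = some cs[i] := by
        simp [PySem.List.pyGet?_natCast, List.getElem?_eq_getElem hi]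
      rw [List.drop_eq_getElem_cons hi]
      simp only [isfunLoop, hg]
      by_cases hp : cs[i] = '('
      · rw [if_pos hp]
        simp only [scanPred, if_pos hp]
        constructor
        · intro _; trivial
        · intro _; exact_mod_cast (by omega : (i : Int) ≠ cs.length)
      · rw [if_neg hp]
        simp only [scanPred, if_neg hp]
        by_cases hl : PySem.Chars.islower cs[i] = true
        · rw [if_neg (by simp [hl]), if_neg (by simp [hl])]
          have hc : ((i : Int) + 1) = ((i + 1 : Nat) : Int) := by push_cast; ring
          rw [hc]
          exact ih (i + 1) (by omega)
        · rw [if_pos (by simp [hl]), if_pos (by simp [hl])]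
          simp
    · rw [PySem.List.pyRange_one_eq_nil (by exact_mod_cast (by omega : cs.length ≤ i))]
      simp [isfunLoop, List.drop_eq_nil_of_le (by omega : cs.length ≤ i), scanPred]

lemma scanPred_of_no_paren (cs : List Char) (h : '(' ∉ cs) : scanPred cs = false := by
  induction cs with
  | nil => rfl
  | cons c rest ih =>
    simp only [scanPred]
    have hc : c ≠ '(' := by intro hc; exact h (hc ▸ List.mem_cons_self)
    rw [if_neg hc]
    by_cases hl : PySem.Chars.islower c = true
    · rw [if_neg (by simp [hl])]
      exact ih (fun hm => h (List.mem_cons_of_mem _ hm))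
    · rw [if_pos (by simp [hl])]

lemma scanPred_of_first_paren (cs : List Char) (p : Nat) (hp : p < cs.length)
    (hpp : cs[p] = '(') (hmin : ∀ i, (hi : i < p) → cs[i]'(by omega) ≠ '(') :
    scanPred cs = (cs.take p).all PySem.Chars.islower := by
  induction cs generalizing p with
  | nil => simp at hp
  | cons c rest ih =>
    cases p with
    | zero =>
      simp only [List.getElem_cons_zero] at hpp
      simp [scanPred, hpp]
    | succ q =>
      have hc : c ≠ '(' := hmin 0 (by omega)
      simp only [scanPred, if_neg hc, List.take_succ_cons, List.all_cons]
      by_cases hl : PySem.Chars.islower c = true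
      · rw [if_neg (by simp [hl]), hl, Bool.true_and]
        exact ih q (by simpa using hp) (by simpa using hpp)
          (fun i hi => by simpa using hmin (i + 1) (by omega))
      · rw [if_pos (by simp [hl])]
        simp [hl]

lemma altCore (cs : List Char) :
    (if PySem.Chars.find cs ['('] = -1 then false
     else (PySem.List.slice cs none (some (PySem.Chars.find cs ['(']))).all PySem.Chars.islower)
      = scanPred cs := by
  by_cases h : PySem.Chars.find cs ['('] = -1
  · have hinf : ¬ ['('] <:+: cs := (PySem.Chars.find_eq_neg_one_iff cs ['(']).mp h
    have hmem : '(' ∉ cs := fun hm => hinf ((List.singleton_infix_iff _ _).mpr hm)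
    rw [if_pos h, scanPred_of_no_paren cs hmem]
  · rw [if_neg h]
    have h0 : (0 : Int) ≤ PySem.Chars.find cs ['('] := by
      have := PySem.Chars.neg_one_le_find cs ['(']
      omega
    obtain ⟨-, hpre, hmin⟩ :=
      PySem.Chars.findFrom_natCast_spec cs ['('] 0 (Nat.zero_le _)
        (by simpa using h)
    simp only [Nat.cast_zero, PySem.Chars.findFrom_zero] at hpre hmin
    set p := (PySem.Chars.find cs ['(']).toNat with hpdef
    have hph : (cs.drop p).head? = some '(' := by
      obtain ⟨t, ht⟩ := hpre; rw [← ht]; rfl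
    rw [List.head?_drop] at hph
    have hplen : p < cs.length := by
      by_contra hge
      simp [List.getElem?_eq_none (by omega : cs.length ≤ p)] at hph
    have hpp : cs[p] = '(' := by
      simpa [List.getElem?_eq_getElem hplen] using hph
    have hmin' : ∀ i, (hi : i < p) → cs[i]'(by omega) ≠ '(' := by
      intro i hi hceq
      refine hmin i (Nat.zero_le _) hi ⟨cs.drop (i + 1), ?_⟩
      rw [List.singleton_append, ← hceq]
      exact (List.drop_eq_getElem_cons (by omega)).symm
    rw [PySem.List.slice_to cs h0, ← hpdef]
    exact (scanPred_of_first_paren cs p hplen hpp hmin').symm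

-- ===== VERDICT =====
theorem isfun_spec : Claim_equal_isfun := by
  intro index string _ hpre
  unfold Spec_isfun
  have hnn : (0 : Int) ≤ index + 1 := by unfold Pre_isfun at hpre; omega
  have hcast : index + 1 = (((index + 1).toNat : Nat) : Int) := (Int.toNat_of_nonneg hnn).symm
  simp only [isfun, isfun_alt]
  rw [hcast, PySem.List.slice_from_natCast, altCore]
  have hA := loopA string.toList string.toList.length (index + 1).toNat (Nat.sub_le _ _)
  by_cases hs : scanPred (string.toList.drop (index + 1).toNat) = true
  · rw [hs, if_pos ⟨hA.mpr hs, trivial⟩]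
  · rw [Bool.not_eq_true] at hs
    rw [hs, if_neg (fun hc => by have hC := hA.mp hc.1; rw [hs] at hC; exact Bool.noConfusion hC)]
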